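-- pv_equiv track=rewrite | github.com/hsn8086/exam | codeforces/ungrouped/cf2033d.py | solve
-- ===== SOURCE A (Python) =====
-- def solve(n, a):
--     prefix = [0]
--     for num in a:
--         prefix.append(prefix[-1] + num)
--
--     dp = [0] * (n + 1)
--     seen = {0: 0}
--
--     for i in range(1, n + 1):
--         if prefix[i] in seen:
--             last = seen[prefix[i]]
--             dp[i] = max(dp[i - 1], dp[last] + 1)
--         else:
--             dp[i] = dp[i - 1]
--
--         seen[prefix[i]] = i
--     return dp[n]
-- ===== SOURCE B (Python) =====
-- def solve(n, a):
--     pref = 0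
--     seen = {0}
--     ans = 0
--     for num in a[:n]:
--         pref += num
--         if pref in seen:
--             ans += 1
--             seen = {pref}
--         else:
--             seen.add(pref)
--     return ans
-- ===== Notes on version B (the rewrite author's own statement) =====
-- stated objective: faster
-- what changed: Replaced the prefix-array + dp-array dynamic programming with a single greedy pass that keeps only a running prefix sum, a seen-set reset at each cut, and a counter (earliest-finish greedy for non-overlapping zero-sum segments).
import Mathlib
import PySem

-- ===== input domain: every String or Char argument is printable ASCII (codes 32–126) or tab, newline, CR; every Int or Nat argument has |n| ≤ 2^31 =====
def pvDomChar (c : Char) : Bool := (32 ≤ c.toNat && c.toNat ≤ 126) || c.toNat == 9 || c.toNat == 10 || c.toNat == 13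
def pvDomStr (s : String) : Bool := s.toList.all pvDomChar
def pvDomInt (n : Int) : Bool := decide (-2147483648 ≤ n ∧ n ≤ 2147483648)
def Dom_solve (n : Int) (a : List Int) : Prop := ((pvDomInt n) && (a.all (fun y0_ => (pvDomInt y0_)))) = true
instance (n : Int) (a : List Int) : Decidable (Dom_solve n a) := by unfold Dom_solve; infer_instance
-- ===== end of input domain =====

-- B replaces A's prefix-array + dp-array dynamic programming by a single greedy pass
-- (running prefix sum, seen-set reset at every cut, counter); measurably faster by a constant factor.

-- ===== PORT A =====
-- loop body of A's dp loop (dp array + last-occurrence dict)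
def solveStepA (pre : List Int) (st : List Int × PySem.Dict Int Int) (i : Int) :
    List Int × PySem.Dict Int Int :=
  let pi := PySem.List.pyGetD pre i 0                          -- prefix[i] (in range under Pre_)
  let dpi :=
    if st.2.contains pi then
      max (PySem.List.pyGetD st.1 (i - 1) 0)
          (PySem.List.pyGetD st.1 (st.2.getD pi 0) 0 + 1)      -- max(dp[i-1], dp[seen[prefix[i]]] + 1)
    else
      PySem.List.pyGetD st.1 (i - 1) 0                         -- dp[i-1]
  (PySem.List.pySetD st.1 i dpi, st.2.insert pi i)             -- dp[i] = dpi; seen[prefix[i]] = i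

def solve (n : Int) (a : List Int) : Int :=
  let pre := a.foldl (fun p num => p ++ [PySem.List.pyGetD p (-1) 0 + num]) [0]
  let dp0 : List Int := List.replicate (n + 1).toNat 0
  let st := (PySem.List.pyRange 1 (n + 1) 1).foldl (solveStepA pre)
              (dp0, PySem.Dict.ofList [((0 : Int), (0 : Int))])
  PySem.List.pyGetD st.1 n 0                                   -- dp[n] (in range under Pre_)

-- ===== PORT B =====
-- loop body of B's greedy pass
def solveStepB (st : Int × PySem.Set Int × Int) (num : Int) : Int × PySem.Set Int × Int :=
  let pref := st.1 + num
  if PySem.Set.contains st.2.1 pref then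
    (pref, PySem.Set.ofList [pref], st.2.2 + 1)                -- cut: ans += 1; seen = {pref}
  else
    (pref, PySem.Set.add st.2.1 pref, st.2.2)                  -- seen.add(pref)

def solve_alt (n : Int) (a : List Int) : Int :=
  ((PySem.List.slice a none (some n)).foldl solveStepB
      (0, PySem.Set.ofList [0], 0)).2.2

-- ===== PRECONDITION & SPEC =====
-- Pre_ excludes exactly the inputs on which A raises IndexError: n < 0 (dp[n] out of range)
-- and n > len(a) (prefix[i] out of range); A returns on every other input.
def Pre_solve (n : Int) (a : List Int) : Prop := 0 ≤ n ∧ n ≤ (a.length : Int)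
instance (n : Int) (a : List Int) : Decidable (Pre_solve n a) := by unfold Pre_solve; infer_instance

def pvWitness_solve : Int × List Int := (3, [1, -1, 0])

def Spec_solve (n : Int) (a : List Int) (out : Int) : Prop := out = solve_alt n a
instance (n : Int) (a : List Int) (out : Int) : Decidable (Spec_solve n a out) := by unfold Spec_solve; infer_instance

-- ===== CLAIM (what is proved, stated in full; the proofs are below) =====
def Claim_equal_solve : Prop := ∀ (n : Int) (a : List Int), Dom_solve n a → Pre_solve n a → Spec_solve n a (solve n a)
-- ===== LEMMAS AND PROOFS =====

-- A's prefix-building fold is scanl of (+)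
lemma pvPrefixFold (l : List Int) : ∀ (p : List Int) (s : Int),
    l.foldl (fun p num => p ++ [PySem.List.pyGetD p (-1) 0 + num]) (p ++ [s])
      = p ++ List.scanl (· + ·) s l := by
  induction l with
  | nil => intro p s; simp
  | cons x xs ih =>
    intro p s
    have hget : PySem.List.pyGetD (p ++ [s]) (-1) 0 = s := by
      simp [PySem.List.pyGetD, PySem.List.pyGet?, PySem.List.pyIdx?]
    rw [List.foldl_cons, hget, ih (p ++ [s]) (s + x)]
    simp [List.scanl_cons]

lemma pvScanlGetD (l : List Int) : ∀ (s : Int) (k : Nat), k ≤ l.length →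
    PySem.List.pyGetD (List.scanl (· + ·) s l) (k : Int) 0 = s + (l.take k).sum := by
  induction l with
  | nil =>
    intro s k hk
    have hk0 : k = 0 := by simpa using hk
    subst hk0
    simp
  | cons x xs ih =>
    intro s k hk
    cases k with
    | zero => simp
    | succ k =>
      have hk' : k ≤ xs.length := by simpa using hk
      have h := ih (s + x) k hk'
      simp only [List.scanl_cons, PySem.List.pyGetD_natCast] at h ⊢
      simp only [List.getD_cons_succ, List.take_succ_cons, List.sum_cons]
      rw [h]; ring

-- the two loop states after k iterations
def pvFoldA (a : List Int) (m k : Nat) : List Int × PySem.Dict Int Int :=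
  (PySem.List.pyRange 1 ((k : Int) + 1) 1).foldl (solveStepA (List.scanl (· + ·) 0 a))
    (List.replicate (m + 1) 0, PySem.Dict.ofList [((0 : Int), (0 : Int))])

def pvFoldB (a : List Int) (k : Nat) : Int × PySem.Set Int × Int :=
  (a.take k).foldl solveStepB (0, PySem.Set.ofList [0], 0)

-- invariant tying A's dp array + last-occurrence dict to B's seen-set + counter
def pvInv (k : Nat) (dp : List Int) (seen : PySem.Dict Int Int)
    (S : PySem.Set Int) (ans : Int) : Prop :=
  PySem.List.pyGetD dp (k : Int) 0 = ans ∧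
  (∀ v : Int, v ∈ S → ∃ j : Nat, j ≤ k ∧ seen.get? v = some (j : Int) ∧
      PySem.List.pyGetD dp (j : Int) 0 = ans) ∧
  (∀ v : Int, v ∉ S → seen.get? v = none ∨ ∃ j : Nat, j ≤ k ∧ seen.get? v = some (j : Int) ∧
      PySem.List.pyGetD dp (j : Int) 0 + 1 ≤ ans)

lemma pvMain (a : List Int) (m : Nat) (hm : m ≤ a.length) :
    ∀ k, k ≤ m →
      (pvFoldA a m k).1.length = m + 1 ∧
      (pvFoldB a k).1 = (a.take k).sum ∧
      pvInv k (pvFoldA a m k).1 (pvFoldA a m k).2 (pvFoldB a k).2.1 (pvFoldB a k).2.2 := by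
  intro k
  induction k with
  | zero =>
    intro _
    have hA0 : pvFoldA a m 0 = (List.replicate (m + 1) 0, PySem.Dict.ofList [((0 : Int), (0 : Int))]) := by
      unfold pvFoldA
      rw [show ((0 : Nat) : Int) + 1 = 1 by norm_num,
        PySem.List.pyRange_one_eq_nil (by norm_num : (1 : Int) ≤ 1), List.foldl_nil]
    have hB0 : pvFoldB a 0 = (0, PySem.Set.ofList [0], 0) := by
      unfold pvFoldB; rw [List.take_zero, List.foldl_nil]
    have hdp0 : ∀ j : Nat, j ≤ m → PySem.List.pyGetD (List.replicate (m + 1) (0 : Int)) (j : Int) 0 = 0 := by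
      intro j hj
      rw [PySem.List.pyGetD_natCast]
      simp [List.getD]
    refine ⟨by rw [hA0]; simp, by rw [hB0]; simp, ?_, ?_, ?_⟩
    · rw [hA0, hB0]; exact hdp0 0 (by omega)
    · intro v hv
      rw [hB0] at hv
      have hv0 : v = 0 := by simpa [PySem.Set.mem_ofList] using hv
      refine ⟨0, by omega, ?_, ?_⟩
      · rw [hA0, hv0]; exact rfl
      · rw [hA0, hB0]; exact hdp0 0 (by omega)
    · intro v hv
      rw [hB0] at hv
      have hv0 : v ≠ 0 := by simpa [PySem.Set.mem_ofList] using hv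
      left
      rw [hA0]
      rw [show PySem.Dict.ofList [((0 : Int), (0 : Int))] = PySem.Dict.empty.insert 0 0 from rfl,
        PySem.Dict.get?_insert]
      simp [hv0, PySem.Dict.get?_empty]
  | succ k ih =>
    intro hk1
    have hkm : k ≤ m := by omega
    have hkl : k < a.length := by omega
    obtain ⟨hlen, hsum, hdpk, hmem, hnmem⟩ := ih hkm
    rcases hAk : pvFoldA a m k with ⟨dp, seen⟩
    rcases hBk : pvFoldB a k with ⟨p, S, ans⟩
    simp only [hAk, hBk] at hlen hsum hdpk hmem hnmem
    -- the unfolding of one more iteration on each side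
    have hA : pvFoldA a m (k + 1) = solveStepA (List.scanl (· + ·) 0 a) (dp, seen) ((k : Int) + 1) := by
      unfold pvFoldA
      rw [show (((k + 1 : Nat)) : Int) + 1 = ((k : Int) + 1) + 1 by push_cast; ring,
        PySem.List.pyRange_one_succ_right (by omega : (1 : Int) ≤ (k : Int) + 1),
        List.foldl_append, List.foldl_cons, List.foldl_nil]
      rw [show (PySem.List.pyRange 1 ((k : Int) + 1) 1).foldl (solveStepA (List.scanl (· + ·) 0 a))
            (List.replicate (m + 1) 0, PySem.Dict.ofList [((0 : Int), (0 : Int))]) = (dp, seen) from hAk]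
    have hB : pvFoldB a (k + 1) = solveStepB (p, S, ans) a[k] := by
      unfold pvFoldB
      rw [List.take_add_one, List.getElem?_eq_getElem hkl]
      simp only [Option.toList_some, List.foldl_append, List.foldl_cons, List.foldl_nil]
      rw [show (a.take k).foldl solveStepB (0, PySem.Set.ofList [0], 0) = (p, S, ans) from hBk]
    have hps : (a.take (k + 1)).sum = (a.take k).sum + a[k] := List.sum_take_succ a k hkl
    have hpi : PySem.List.pyGetD (List.scanl (· + ·) 0 a) ((k : Int) + 1) 0 = (a.take (k + 1)).sum := by
      have h := pvScanlGetD a 0 (k + 1) (by omega)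
      rw [show (((k + 1 : Nat)) : Int) = (k : Int) + 1 by push_cast; ring] at h
      rw [h]; ring
    have hc' : (k : Int) + 1 = (((k + 1 : Nat)) : Int) := by push_cast; ring
    have hpref : p + a[k] = (a.take (k + 1)).sum := by rw [hps, hsum]
    have hread : ∀ (j' : Nat) (w : Int),
        PySem.List.pyGetD (PySem.List.pySetD dp ((k : Int) + 1) w) (j' : Int) 0
          = if j' = k + 1 then w else PySem.List.pyGetD dp (j' : Int) 0 := by
      intro j' w
      rw [hc']
      exact PySem.List.pyGetD_pySetD_natCast dp (k + 1) j' w 0 (by omega)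
    by_cases hin : (a.take (k + 1)).sum ∈ S
    · -- cut step: B resets the set, A's dp strictly increases
      obtain ⟨j, hjk, hjget, hjdp⟩ := hmem _ hin
      have hcontS : PySem.Set.contains S ((a.take (k + 1)).sum) = true :=
        (PySem.Set.contains_iff _ _).mpr hin
      have hcontD : seen.contains ((a.take (k + 1)).sum) = true := by
        rw [PySem.Dict.contains_eq_isSome_get?, hjget]; rfl
      have hgetD : seen.getD ((a.take (k + 1)).sum) 0 = (j : Int) := by
        rw [PySem.Dict.getD_eq_get?_getD, hjget]; rfl
      have hA2 : pvFoldA a m (k + 1)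
          = (PySem.List.pySetD dp ((k : Int) + 1) (ans + 1), seen.insert ((a.take (k + 1)).sum) ((k : Int) + 1)) := by
        rw [hA]
        simp only [solveStepA, hpi, hcontD, if_true, hgetD, add_sub_cancel_right, hdpk, hjdp]
        rw [max_eq_right (by omega : ans ≤ ans + 1)]
      have hB2 : pvFoldB a (k + 1) = ((a.take (k + 1)).sum, PySem.Set.ofList [(a.take (k + 1)).sum], ans + 1) := by
        rw [hB]
        simp only [solveStepB, hpref, hcontS, if_true]
      rw [hA2, hB2]
      refine ⟨by simpa [PySem.List.length_pySetD] using hlen, rfl, ?_, ?_, ?_⟩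
      · rw [hread (k + 1) (ans + 1)]; simp
      · intro v hv
        have hv0 : v = (a.take (k + 1)).sum := by simpa [PySem.Set.mem_ofList] using hv
        refine ⟨k + 1, le_refl _, ?_, ?_⟩
        · rw [hv0, PySem.Dict.get?_insert_self, hc']
        · rw [hread (k + 1) (ans + 1)]; simp
      · intro v hv
        have hv0 : v ≠ (a.take (k + 1)).sum := by simpa [PySem.Set.mem_ofList] using hv
        rw [PySem.Dict.get?_insert, if_neg hv0]
        by_cases hvS : v ∈ S
        · obtain ⟨j', hj'k, hg', hd'⟩ := hmem v hvS
          right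
          exact ⟨j', by omega, hg', by rw [hread j' (ans + 1), if_neg (by omega)]; simp only []; omega⟩
        · rcases hnmem v hvS with hnone | ⟨j', hj'k, hg', hd'⟩
          · left; exact hnone
          · right
            exact ⟨j', by omega, hg', by rw [hread j' (ans + 1), if_neg (by omega)]; simp only []; omega⟩
    · -- no cut: B extends the set, A's dp stays level
      have hcontS : PySem.Set.contains S ((a.take (k + 1)).sum) = false := by
        rw [Bool.eq_false_iff]
        intro h
        exact hin ((PySem.Set.contains_iff _ _).mp h)
      have hA2 : pvFoldA a m (k + 1)
          = (PySem.List.pySetD dp ((k : Int) + 1) ans, seen.insert ((a.take (k + 1)).sum) ((k : Int) + 1)) := by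
        rw [hA]
        rcases hnmem _ hin with hnone | ⟨j, hjk, hjget, hjle⟩
        · have hcontD : seen.contains ((a.take (k + 1)).sum) = false := by
            rw [PySem.Dict.contains_eq_isSome_get?, hnone]; rfl
          simp only [solveStepA, hpi, hcontD, Bool.false_eq_true, if_false, add_sub_cancel_right, hdpk]
        · have hcontD : seen.contains ((a.take (k + 1)).sum) = true := by
            rw [PySem.Dict.contains_eq_isSome_get?, hjget]; rfl
          have hgetD : seen.getD ((a.take (k + 1)).sum) 0 = (j : Int) := by
            rw [PySem.Dict.getD_eq_get?_getD, hjget]; rfl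
          simp only [solveStepA, hpi, hcontD, if_true, hgetD, add_sub_cancel_right, hdpk]
          rw [max_eq_left (by omega : PySem.List.pyGetD dp (j : Int) 0 + 1 ≤ ans)]
      have hB2 : pvFoldB a (k + 1) = ((a.take (k + 1)).sum, PySem.Set.add S ((a.take (k + 1)).sum), ans) := by
        rw [hB]
        simp only [solveStepB, hpref, hcontS, Bool.false_eq_true, if_false]
      rw [hA2, hB2]
      refine ⟨by simpa [PySem.List.length_pySetD] using hlen, rfl, ?_, ?_, ?_⟩
      · rw [hread (k + 1) ans]; simp
      · intro v hv
        rcases (PySem.Set.mem_add _ _ _).mp hv with hvS | hveq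
        · have hvne : v ≠ (a.take (k + 1)).sum := fun h => hin (h ▸ hvS)
          obtain ⟨j', hj'k, hg', hd'⟩ := hmem v hvS
          refine ⟨j', by omega, ?_, ?_⟩
          · rw [PySem.Dict.get?_insert, if_neg hvne]; exact hg'
          · rw [hread j' ans, if_neg (by omega)]; exact hd'
        · refine ⟨k + 1, le_refl _, ?_, ?_⟩
          · rw [hveq, PySem.Dict.get?_insert_self, hc']
          · rw [hread (k + 1) ans]; simp
      · intro v hv
        have hv' : v ∉ S ∧ v ≠ (a.take (k + 1)).sum := by
          constructor
          · intro h; exact hv ((PySem.Set.mem_add _ _ _).mpr (Or.inl h))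
          · intro h; exact hv ((PySem.Set.mem_add _ _ _).mpr (Or.inr h))
        rw [PySem.Dict.get?_insert, if_neg hv'.2]
        rcases hnmem v hv'.1 with hnone | ⟨j', hj'k, hg', hd'⟩
        · left; exact hnone
        · right
          exact ⟨j', by omega, hg', by rw [hread j' ans, if_neg (by omega)]; exact hd'⟩

-- ===== VERDICT (by name: the statement is the Claim_ definition above) =====
theorem solve_spec : Claim_equal_solve := by
  intro n a _ hpre
  obtain ⟨h0, hn⟩ := hpre
  obtain ⟨m, rfl⟩ : ∃ m : Nat, n = (m : Int) := ⟨n.toNat, by omega⟩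
  have hml : m ≤ a.length := by exact_mod_cast hn
  unfold Spec_solve solve solve_alt
  have hpref : a.foldl (fun p num => p ++ [PySem.List.pyGetD p (-1) 0 + num]) [0]
      = List.scanl (· + ·) 0 a := by
    have h := pvPrefixFold a [] 0
    simpa using h
  have hslice : PySem.List.slice a none (some (m : Int)) = a.take m := by
    rw [PySem.List.slice_to a (Int.natCast_nonneg m)]
    simp
  have hrep : ((m : Int) + 1).toNat = m + 1 := by omega
  rw [hpref, hslice, hrep]
  obtain ⟨_, _, hdp, _, _⟩ := pvMain a m hml m (le_refl m)
  exact hdp
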